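-- pv_equiv track=rewrite | github.com/chenxin-hdu/HetFL | defects4j/coverage_analysis.py | decode_coverage_signature
-- ===== SOURCE A (Python) =====
-- dict_type_signature_symbol2full_name = {
--     "B": "byte",
--     "C": "char",
--     "D": "double",
--     "F": "float",
--     "I": "int",
--     "J": "long",
--     "O": "object",
--     "S": "short",
--     "V": "void",
--     "Z": "boolean",
-- }
--
-- def decode_origin_type_signature_symbol(signature):
--     if len(signature) == 1:
--         return dict_type_signature_symbol2full_name.get(signature)
--     decode_signature = []
--     array_flag = False
--     for key in signature:
--         if key == "[":
--             array_flag = True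
--             continue
--         decode_key = dict_type_signature_symbol2full_name.get(key)
--         if array_flag:
--             decode_signature.append("[" + decode_key)
--         else:
--             decode_signature.append(decode_key)
--         array_flag = False
--
--     decode_signature = ";".join(decode_signature)
--     return decode_signature
--
-- def decode_type_signature_symbol(signature, clz_path):
--     decode_param = ""
--     if signature.startswith("["):
--         decode_param += "["
--         signature = signature[1:]
--     if signature.startswith("L"):
--         signature = signature[1:]
--         signature = signature.split("/")[-1]
--         decode_param += signature.strip(";")
--     else:
--         key = signature[0]
--         if key in dict_type_signature_symbol2full_name:
--             decode_param += decode_origin_type_signature_symbol(key)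
--         if len(signature) > 1:
--             decode_param += f";{decode_type_signature_symbol(signature[1:], clz_path)}"
--     return decode_param
--
-- def decode_coverage_signature(coverage_signature, clz_path):
--     parts = coverage_signature.split(")")
--     params = parts[0][1:].split(";")
--     return_string = parts[1]
--     decode_params = []
--     for param in params:
--         if param == "":
--             continue
--         decode_params.append(decode_type_signature_symbol(param, clz_path))
--     decode_params = ";".join(decode_params)
--     return_string = decode_type_signature_symbol(return_string, clz_path)
--     decode_signature = f"({decode_params}){return_string}"
--     return decode_signature
-- ===== SOURCE B (Python) =====
-- dict_type_signature_symbol2full_name = {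
--     "B": "byte",
--     "C": "char",
--     "D": "double",
--     "F": "float",
--     "I": "int",
--     "J": "long",
--     "O": "object",
--     "S": "short",
--     "V": "void",
--     "Z": "boolean",
-- }
--
-- def _decode_pieces(signature):
--     # iterative decoder: walk the fragment once, collecting decoded pieces in a list
--     pieces = []
--     i = 0
--     while i < len(signature):
--         piece = ""
--         if signature[i] == "[":
--             piece = "["
--             i += 1
--         if i < len(signature) and signature[i] == "L":
--             pieces.append(piece + signature[i + 1:].split("/")[-1].strip(";"))
--             return pieces
--         if i < len(signature):
--             piece += dict_type_signature_symbol2full_name.get(signature[i], "")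
--             i += 1
--         pieces.append(piece)
--     return pieces
--
-- def decode_coverage_signature(coverage_signature, clz_path):
--     parts = coverage_signature.split(")")
--     decoded = [";".join(_decode_pieces(p)) for p in parts[0][1:].split(";") if p]
--     return "(" + ";".join(decoded) + ")" + ";".join(_decode_pieces(parts[1]))
-- ===== Notes on version B (the rewrite author's own statement) =====
-- stated objective: alternative
-- what changed: The right-recursive per-character decoder (which builds the string by prepending ';' before each recursive call and re-enters itself on every remaining suffix) is replaced by a single iterative index loop that collects the decoded pieces in a list and joins them once; Pre_ excludes only the inputs on which A raises IndexError (no ')' in the signature, or an empty/dangling type fragment).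
import Mathlib
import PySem

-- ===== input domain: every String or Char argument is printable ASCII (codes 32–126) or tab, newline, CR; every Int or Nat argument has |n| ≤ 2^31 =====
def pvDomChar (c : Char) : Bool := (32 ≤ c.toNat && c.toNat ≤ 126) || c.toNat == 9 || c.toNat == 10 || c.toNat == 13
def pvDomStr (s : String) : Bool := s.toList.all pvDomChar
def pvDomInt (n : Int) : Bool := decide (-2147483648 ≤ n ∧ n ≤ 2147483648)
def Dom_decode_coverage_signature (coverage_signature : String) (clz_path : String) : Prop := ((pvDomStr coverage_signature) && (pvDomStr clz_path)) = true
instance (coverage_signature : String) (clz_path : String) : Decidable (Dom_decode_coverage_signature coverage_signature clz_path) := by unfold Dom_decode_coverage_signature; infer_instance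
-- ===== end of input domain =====

-- B replaces A's right-recursive per-character decoder (which prepends ';' before each
-- recursive call) by an iterative single pass that collects the decoded pieces in a list
-- and joins them once; objective: alternative decomposition (same cost). Return-value equivalence.

-- ===== PORT A =====

-- dict_type_signature_symbol2full_name (shared constant table of both sources)
def pvDict : Char → Option (List Char)
  | 'B' => some "byte".toList
  | 'C' => some "char".toList
  | 'D' => some "double".toList
  | 'F' => some "float".toList
  | 'I' => some "int".toList
  | 'J' => some "long".toList
  | 'O' => some "object".toList
  | 'S' => some "short".toList
  | 'V' => some "void".toList
  | 'Z' => some "boolean".toList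
  | _ => none

-- decode_origin_type_signature_symbol (A's helper; dict.get of an unknown key in the loop
-- would make Python concatenate None — a TypeError; the port uses getD [] there, and that
-- branch is unreachable from decode_coverage_signature, which guards every call)
def pvDecodeOrigin (signature : List Char) : Option (List Char) :=
  if signature.length = 1 then pvDict (signature.headD ' ')
  else
    let step := fun (st : List (List Char) × Bool) (key : Char) =>
      if key = '[' then (st.1, true)
      else
        let decode_key := (pvDict key).getD []
        if st.2 then (st.1 ++ ['[' :: decode_key], false) else (st.1 ++ [decode_key], false)
    some (PySem.Chars.join [';'] (signature.foldl step ([], false)).1)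

-- decode_type_signature_symbol (A's recursive decoder; clz_path is unused by the source).
-- fuel = length + 1 at entry (each pass strips ≥ 1 char, so fuel never runs out).
-- Python raises IndexError at signature[0] on an empty tail — Pre_ excludes those inputs;
-- the port reads the head with Option and appends nothing there.
def pvDecodeSymAGo : Nat → List Char → List Char
  | 0, _ => []
  | fuel + 1, signature =>
    let dp : List Char := if PySem.Chars.startswith signature ['['] then ['['] else []
    let sig1 : List Char := if PySem.Chars.startswith signature ['['] then signature.drop 1 else signature
    if PySem.Chars.startswith sig1 ['L'] then
      dp ++ PySem.Chars.stripChars ((PySem.List.pyGet? (PySem.Chars.splitOn (sig1.drop 1) ['/']) (-1)).getD []) [';']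
    else
      let dp2 := match sig1.head? with
        | some key => if (pvDict key).isSome then dp ++ ((pvDecodeOrigin [key]).getD []) else dp
        | none => dp
      if sig1.length > 1 then dp2 ++ [';'] ++ pvDecodeSymAGo fuel (sig1.drop 1) else dp2

def pvDecodeSymA (signature : List Char) : List Char :=
  pvDecodeSymAGo (signature.length + 1) signature

def decode_coverage_signature (coverage_signature : String) (clz_path : String) : String :=
  let parts := PySem.Chars.splitOn coverage_signature.toList [')']
  let params := PySem.Chars.splitOn ((parts.getD 0 []).drop 1) [';']
  -- parts[1]: IndexError when the string has no ')' — Pre_ excludes; the port defaults to ""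
  let return_string := (PySem.List.pyGet? parts 1).getD []
  let decode_params := params.foldl
    (fun acc param => if param = [] then acc else acc ++ [pvDecodeSymA param]) []
  let joined := PySem.Chars.join [';'] decode_params
  let return_decoded := pvDecodeSymA return_string
  String.ofList ('(' :: joined ++ [')'] ++ return_decoded)

-- ===== PORT B =====

-- signature[i+1:].split("/")[-1].strip(";")  (B's L-branch expression)
def pvLName (tail : List Char) : List Char :=
  PySem.Chars.stripChars ((PySem.List.pyGet? (PySem.Chars.splitOn tail ['/']) (-1)).getD []) [';']

-- _decode_pieces: one pass over the fragment (the 'while i < len' loop as structural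
-- recursion on the remaining characters; each step consumes the chars the loop body does)
def pvDecodePiecesB : List Char → List (List Char)
  | [] => []
  | c :: rest =>
    if c = '[' then
      match rest with
      | [] => [['[']]
      | key :: rest2 =>
        if key = 'L' then [['['] ++ pvLName rest2]
        else (['['] ++ (pvDict key).getD []) :: pvDecodePiecesB rest2
    else if c = 'L' then
      [pvLName rest]
    else
      ((pvDict c).getD []) :: pvDecodePiecesB rest

def decode_coverage_signature_alt (coverage_signature : String) (clz_path : String) : String :=
  let parts := PySem.Chars.splitOn coverage_signature.toList [')']
  let decoded := ((PySem.Chars.splitOn ((parts.getD 0 []).drop 1) [';']).filter (fun p => p ≠ [])).map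
      (fun p => PySem.Chars.join [';'] (pvDecodePiecesB p))
  String.ofList ('(' :: PySem.Chars.join [';'] decoded ++ [')'] ++
    PySem.Chars.join [';'] (pvDecodePiecesB ((PySem.List.pyGet? parts 1).getD [])))

-- ===== PRECONDITION & SPEC =====

-- okSym is the well-formedness grammar of a type-signature fragment: at each step one
-- optional '[' plus one character, an 'L' consuming the rest, and never a dangling '[' or
-- an empty fragment (there Python's signature[0] raises IndexError).
def okSym : List Char → Bool
  | [] => false
  | '[' :: [] => false
  | '[' :: 'L' :: _ => true
  | 'L' :: _ => true
  | '[' :: _ :: rest => rest.isEmpty || okSym rest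
  | _ :: rest => rest.isEmpty || okSym rest

-- Pre_ excludes exactly the inputs on which the Python A raises IndexError: a signature
-- without ')' (parts[1]), or an empty/dangling fragment reached by the recursive decoder.
def Pre_decode_coverage_signature (coverage_signature : String) (clz_path : String) : Prop :=
  let parts := PySem.Chars.splitOn coverage_signature.toList [')']
  2 ≤ parts.length ∧ okSym (parts.getD 1 []) = true ∧
    ∀ p ∈ PySem.Chars.splitOn ((parts.getD 0 []).drop 1) [';'], p ≠ [] → okSym p = true

instance (coverage_signature : String) (clz_path : String) : Decidable (Pre_decode_coverage_signature coverage_signature clz_path) := by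
  unfold Pre_decode_coverage_signature; infer_instance

def pvWitness_decode_coverage_signature : String × String := ("([I;Ljava/lang/String;)V", "p")

def Spec_decode_coverage_signature (coverage_signature : String) (clz_path : String) (out : String) : Prop := out = decode_coverage_signature_alt coverage_signature clz_path
instance (coverage_signature : String) (clz_path : String) (out : String) : Decidable (Spec_decode_coverage_signature coverage_signature clz_path out) := by unfold Spec_decode_coverage_signature; infer_instance

-- ===== CLAIM (what is proved, stated in full; the proofs are below) =====
def Claim_equal_decode_coverage_signature : Prop := ∀ (coverage_signature : String) (clz_path : String), Dom_decode_coverage_signature coverage_signature clz_path → Pre_decode_coverage_signature coverage_signature clz_path → Spec_decode_coverage_signature coverage_signature clz_path (decode_coverage_signature coverage_signature clz_path)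

-- ===== LEMMAS AND PROOFS =====

theorem decodePiecesB_ne_nil (s : List Char) (h : s ≠ []) : pvDecodePiecesB s ≠ [] := by
  match s with
  | c :: rest =>
    rw [pvDecodePiecesB.eq_def]
    repeat' split
    all_goals simp_all

-- B's loop consumes exactly what each level of A's recursion consumes; the joined pieces
-- are A's result.
theorem decodeSymGo_eq_join (fuel : Nat) :
    ∀ s : List Char, s.length < fuel →
      pvDecodeSymAGo fuel s = PySem.Chars.join [';'] (pvDecodePiecesB s) := by
  induction fuel with
  | zero => intro s h; omega
  | succ f ih =>
    intro s hs
    match s with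
    | [] => rfl
    | '[' :: [] => rfl
    | '[' :: 'L' :: r => simp [pvDecodeSymAGo, pvDecodePiecesB, pvLName, PySem.Chars.join, List.intercalate, PySem.Chars.startswith, List.isPrefixOf]
    | a :: rest =>
      by_cases hab : a = '['
      · subst hab
        cases rest with
        | nil => rfl
        | cons b r =>
          by_cases hbL : b = 'L'
          · subst hbL
            simp [pvDecodeSymAGo, pvDecodePiecesB, pvLName, PySem.Chars.join, List.intercalate, PySem.Chars.startswith, List.isPrefixOf]
          · have hLb : ¬ ('L' = b) := fun h => hbL h.symm
            rcases r with _ | ⟨x, xs⟩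
            · cases hpd : pvDict b <;>
                simp [pvDecodeSymAGo, pvDecodePiecesB, PySem.Chars.startswith, List.isPrefixOf, PySem.Chars.join, List.intercalate, pvDecodeOrigin, hbL, hLb, hpd]
            · have hlen : (x :: xs).length < f := by simp at hs ⊢; omega
              rcases hgb : pvDecodePiecesB (x :: xs) with _ | ⟨m, t⟩
              · exact absurd hgb (decodePiecesB_ne_nil (x :: xs) (by simp))
              · have hIH := ih (x :: xs) (by omega)
                rw [hgb] at hIH
                conv_lhs => rw [pvDecodeSymAGo]
                conv_rhs => rw [pvDecodePiecesB]
                cases hpd : pvDict b <;>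
                  simp [PySem.Chars.startswith, List.isPrefixOf, PySem.Chars.join, List.intercalate, pvDecodeOrigin, hbL, hLb, hpd, hgb, hIH]
      · by_cases haL : a = 'L'
        · subst haL
          rw [pvDecodeSymAGo, pvDecodePiecesB.eq_def]
          simp [pvLName, PySem.Chars.join, List.intercalate, PySem.Chars.startswith, List.isPrefixOf]
        · have hba : ¬ ('[' = a) := fun h => hab h.symm
          have hLa : ¬ ('L' = a) := fun h => haL h.symm
          rcases rest with _ | ⟨x, xs⟩
          · cases hpd : pvDict a <;>
              simp [pvDecodeSymAGo, pvDecodePiecesB, PySem.Chars.startswith, List.isPrefixOf, PySem.Chars.join, List.intercalate, pvDecodeOrigin, hab, haL, hba, hLa, hpd]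
          · have hlen : (x :: xs).length < f := by simp at hs ⊢; omega
            rcases hgb : pvDecodePiecesB (x :: xs) with _ | ⟨m, t⟩
            · exact absurd hgb (decodePiecesB_ne_nil (x :: xs) (by simp))
            · have hIH := ih (x :: xs) (by omega)
              rw [hgb] at hIH
              conv_lhs => rw [pvDecodeSymAGo]
              conv_rhs => rw [pvDecodePiecesB]
              cases hpd : pvDict a <;>
                simp [PySem.Chars.startswith, List.isPrefixOf, PySem.Chars.join, List.intercalate, pvDecodeOrigin, hab, haL, hba, hLa, hpd, hgb, hIH]

theorem decodeSymA_eq_join (s : List Char) :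
    pvDecodeSymA s = PySem.Chars.join [';'] (pvDecodePiecesB s) := by
  exact decodeSymGo_eq_join (s.length + 1) s (by omega)

-- A's foldl accumulation of the nonempty params equals filter-then-map
theorem foldl_append_ne_nil (f : List Char → List Char) :
    ∀ (l : List (List Char)) (acc : List (List Char)),
      l.foldl (fun acc param => if param = [] then acc else acc ++ [f param]) acc
        = acc ++ (l.filter (fun q => q ≠ [])).map f := by
  intro l
  induction l with
  | nil => intro acc; simp
  | cons x t ih =>
    intro acc
    by_cases hx : x = [] <;> simp [List.foldl_cons, hx, ih]

theorem top_equal (s : String) (clz : String) :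
    decode_coverage_signature s clz = decode_coverage_signature_alt s clz := by
  rw [decode_coverage_signature, decode_coverage_signature_alt]
  simp only [decodeSymA_eq_join,
    foldl_append_ne_nil (fun q => PySem.Chars.join [';'] (pvDecodePiecesB q)) _ []]
  simp

-- ===== VERDICT (by name: the statement is the Claim_ definition above) =====
theorem decode_coverage_signature_spec : Claim_equal_decode_coverage_signature := by
  intro s c _ _
  unfold Spec_decode_coverage_signature
  exact top_equal s c
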